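-- pv_equiv track=rewrite | github.com/pablojr1971/CodeSignal | digitDegree.py | digitDegree
-- ===== SOURCE A (Python) =====
-- def digitDegree(n, c=0):
--
--     res = 0
--
--     if len(str(n)) == 1:
--         return c
--
--     else:
--         for a in str(n):
--             res += int(a)
--
--         return digitDegree(res, c+1)
-- ===== SOURCE B (Python) =====
-- def digitDegree(n, c=0):
--     k = 0
--     while n >= 10:
--         s = 0
--         m = n
--         while m > 0:
--             s += m % 10
--             m //= 10
--         n = s
--         k += 1
--     return c + k
-- ===== Notes on version B (the rewrite author's own statement) =====
-- stated objective: alternative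
-- what changed: Replaces A's string-based recursion (len(str(n)), per-character int() summation, recursive call carrying the accumulator) with purely arithmetic iteration: nested while loops extracting digits via % 10 and //= 10, a local iteration counter added to c at the end.
-- outside the precondition, e.g. on digitDegree(-5, 0): A raises ValueError, B returns 0
import Mathlib
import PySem

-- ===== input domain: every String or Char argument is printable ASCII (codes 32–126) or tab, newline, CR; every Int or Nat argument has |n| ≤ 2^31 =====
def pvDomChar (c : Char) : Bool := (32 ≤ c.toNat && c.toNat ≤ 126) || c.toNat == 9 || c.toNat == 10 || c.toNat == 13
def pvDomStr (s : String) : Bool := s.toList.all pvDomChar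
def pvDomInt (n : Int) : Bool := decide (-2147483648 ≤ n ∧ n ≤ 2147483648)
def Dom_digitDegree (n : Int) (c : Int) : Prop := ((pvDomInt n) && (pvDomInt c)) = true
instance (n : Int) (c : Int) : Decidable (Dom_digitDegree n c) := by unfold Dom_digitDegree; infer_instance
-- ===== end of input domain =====

-- B replaces A's string-based recursion by an arithmetic iterative loop (digit sums via % and //,
-- counter added to c at the end); equivalence is about the return value on n ≥ 0 (A raises ValueError for n < 0).

-- ===== PORT A =====
-- res = 0; for a in str(n): res += int(a)   (int('-') raises ValueError: ofChars? = none there; Pre_ excludes n < 0)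
def pvDigitsumA (n : Int) : Int :=
  (PySem.Int.toChars n).foldl (fun res a => res + (PySem.Int.ofChars? [a]).getD 0) 0

-- the recursion of A, with a fuel guard only (the digit sum strictly decreases, n.natAbs + 1 steps always suffice)
def pvGoA : Nat → Int → Int → Int
  | 0, _, c => c
  | fuel+1, n, c =>
    if PySem.Str.len (PySem.Int.toStr n) == 1 then c
    else pvGoA fuel (pvDigitsumA n) (c + 1)

def digitDegree (n : Int) (c : Int) : Int := pvGoA (n.natAbs + 1) n c

-- ===== PORT B =====
-- inner while: while m > 0: s += m % 10; m //= 10   (fuel guard only; m.toNat + 1 steps always suffice)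
def pvDsumB : Nat → Int → Int → Int
  | 0, _, s => s
  | fuel+1, m, s => if 0 < m then pvDsumB fuel (PySem.Int.floordiv m 10) (s + PySem.Int.mod m 10) else s

-- outer while: while n >= 10: n = digitsum(n); k += 1   (fuel guard only, n.natAbs + 1 always suffices)
def pvWhileB : Nat → Int → Int → Int
  | 0, _, k => k
  | fuel+1, n, k => if 10 ≤ n then pvWhileB fuel (pvDsumB (n.toNat + 1) n 0) (k + 1) else k

def digitDegree_alt (n : Int) (c : Int) : Int := c + pvWhileB (n.natAbs + 1) n 0

-- ===== PRECONDITION & SPEC =====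
-- Pre_ excludes n < 0, on which A raises ValueError (int('-') on the sign character of str(n)).
def Pre_digitDegree (n : Int) (c : Int) : Prop := 0 ≤ n
instance (n : Int) (c : Int) : Decidable (Pre_digitDegree n c) := by unfold Pre_digitDegree; infer_instance
def pvWitness_digitDegree : Int × Int := (1234, 0)

def Spec_digitDegree (n : Int) (c : Int) (out : Int) : Prop := out = digitDegree_alt n c
instance (n : Int) (c : Int) (out : Int) : Decidable (Spec_digitDegree n c out) := by unfold Spec_digitDegree; infer_instance

-- ===== CLAIM (what is proved, stated in full; the proofs are below) =====
def Claim_equal_digitDegree : Prop := ∀ (n : Int) (c : Int), Dom_digitDegree n c → Pre_digitDegree n c → Spec_digitDegree n c (digitDegree n c)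

-- ===== LEMMAS AND PROOFS =====

-- digit sums over Nat.digits
theorem pv_sum_digits_le (n : Nat) : (Nat.digits 10 n).sum ≤ n := by
  induction n using Nat.strong_induction_on with
  | _ n ih =>
    rcases Nat.eq_zero_or_pos n with h | h
    · simp [h]
    · rw [Nat.digits_def' (by norm_num : (1:Nat) < 10) h]
      have := ih (n / 10) (Nat.div_lt_self h (by norm_num))
      simp only [List.sum_cons]
      omega

theorem pv_sum_digits_lt (n : Nat) (h : 10 ≤ n) : (Nat.digits 10 n).sum < n := by
  rw [Nat.digits_def' (by norm_num : (1:Nat) < 10) (by omega)]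
  have := pv_sum_digits_le (n / 10)
  simp only [List.sum_cons]
  omega

-- B's inner loop computes the digit sum
theorem pv_dsumB_eq (n : Nat) : ∀ (fuel : Nat) (s : Int), n < fuel → pvDsumB fuel (n : Int) s = s + ((Nat.digits 10 n).sum : Int) := by
  induction n using Nat.strong_induction_on with
  | _ n ih =>
    intro fuel s hf
    match fuel with
    | f+1 =>
    rcases Nat.eq_zero_or_pos n with h | h
    · subst h; rw [pvDsumB]; simp
    · rw [pvDsumB]
      have hpos : (0:Int) < (n:Int) := by exact_mod_cast h
      have hdiv : PySem.Int.floordiv (n : Int) 10 = ((n / 10 : Nat) : Int) := by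
        rw [PySem.Int.floordiv, Int.fdiv_eq_ediv, if_pos (Or.inl (by norm_num))]
        omega
      have hmod : PySem.Int.mod (n : Int) 10 = ((n % 10 : Nat) : Int) := by
        rw [PySem.Int.mod, Int.fmod_eq_emod, if_pos (Or.inl (by norm_num))]
        omega
      rw [if_pos hpos, hdiv, hmod,
          ih (n / 10) (Nat.div_lt_self h (by norm_num)) f _ (by omega)]
      rw [Nat.digits_def' (by norm_num : (1:Nat) < 10) h]
      simp only [List.sum_cons]
      push_cast
      ring

-- Nat.toDigits in terms of Nat.digits
theorem pv_toDigitsCore_eq : ∀ (fuel n : Nat) (acc : List Char), 0 < n → n < fuel →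
    Nat.toDigitsCore 10 fuel n acc = ((Nat.digits 10 n).map Nat.digitChar).reverse ++ acc := by
  intro fuel
  induction fuel with
  | zero => omega
  | succ f ih =>
    intro n acc hn hf
    rw [Nat.toDigitsCore]
    by_cases h10 : n / 10 = 0
    · rw [if_pos h10]
      have hn10 : n < 10 := by omega
      rw [Nat.digits_def' (by norm_num : (1:Nat) < 10) hn, h10]
      simp
    · rw [if_neg h10]
      rw [ih (n / 10) _ (by omega) (by omega)]
      rw [Nat.digits_def' (by norm_num : (1:Nat) < 10) hn]
      simp

theorem pv_toDigits_eq (n : Nat) (hn : 0 < n) :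
    Nat.toDigits 10 n = ((Nat.digits 10 n).map Nat.digitChar).reverse := by
  rw [Nat.toDigits, pv_toDigitsCore_eq (n + 1) n [] hn (by omega)]
  simp

theorem pv_toChars_nat (n : Nat) : PySem.Int.toChars (n : Int) = Nat.toDigits 10 n := by
  simp [PySem.Int.toChars]

-- the foldl of A is the sum of the per-char values
theorem pv_foldl_sum (l : List Char) : ∀ init : Int,
    l.foldl (fun res a => res + (PySem.Int.ofChars? [a]).getD 0) init
      = init + (l.map (fun a => (PySem.Int.ofChars? [a]).getD 0)).sum := by
  induction l with
  | nil => simp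
  | cons a t ih => intro init; simp [List.foldl, ih]; ring

theorem pv_char_val (d : Nat) (hd : d < 10) :
    (PySem.Int.ofChars? [Nat.digitChar d]).getD 0 = (d : Int) := by
  interval_cases d <;> decide

theorem pv_map_digits_sum (l : List Nat) (h : ∀ d ∈ l, d < 10) :
    (l.map (fun d => (PySem.Int.ofChars? [Nat.digitChar d]).getD 0)).sum = (l.sum : Int) := by
  induction l with
  | nil => simp
  | cons a t ih =>
    simp only [List.map_cons, List.sum_cons]
    rw [pv_char_val a (h a (by simp)), ih (fun d hd => h d (by simp [hd]))]
    push_cast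
    ring

theorem pv_digitsumA_eq (n : Nat) (hn : 0 < n) :
    pvDigitsumA (n : Int) = ((Nat.digits 10 n).sum : Int) := by
  unfold pvDigitsumA
  rw [pv_toChars_nat, pv_toDigits_eq n hn, pv_foldl_sum]
  rw [List.map_reverse, List.sum_reverse, List.map_map]
  have : ((Nat.digits 10 n).map ((fun a => (PySem.Int.ofChars? [a]).getD 0) ∘ Nat.digitChar)).sum
      = (((Nat.digits 10 n)).map (fun d => (PySem.Int.ofChars? [Nat.digitChar d]).getD 0)).sum := rfl
  rw [this, pv_map_digits_sum _ (fun d hd => Nat.digits_lt_base (by norm_num) hd)]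
  simp

-- length of str(n) for n : Nat
theorem pv_len_one_iff (n : Nat) : (PySem.Str.len (PySem.Int.toStr (n : Int)) == 1) = true ↔ n < 10 := by
  have hlist : (PySem.Int.toStr (n : Int)).toList = PySem.Int.toChars (n : Int) :=
    PySem.Int.toList_toStr _
  have hlen : PySem.Str.len (PySem.Int.toStr (n : Int)) = ((PySem.Int.toChars (n : Int)).length : Int) := by
    simp [PySem.Str.len, hlist]
  rcases Nat.eq_zero_or_pos n with h | h
  · subst h
    constructor
    · intro _; norm_num
    · intro _; decide
  · rw [hlen, pv_toChars_nat, pv_toDigits_eq n h]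
    simp only [List.length_reverse, List.length_map]
    constructor
    · intro hb
      by_contra hge
      push_neg at hge
      rw [Nat.digits_def' (by norm_num : (1:Nat) < 10) (by omega)] at hb
      have hne : Nat.digits 10 (n / 10) ≠ [] :=
        Nat.digits_ne_nil_iff_ne_zero.mpr (by omega)
      simp only [List.length_cons, beq_iff_eq] at hb
      have : (Nat.digits 10 (n / 10)).length = 0 := by omega
      exact hne (List.length_eq_zero_iff.mp this)
    · intro hlt
      rw [Nat.digits_def' (by norm_num : (1:Nat) < 10) h]
      rw [Nat.digits_eq_nil_iff_eq_zero.mpr (by omega)]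
      simp

-- the core equivalence: both loops compute the same count
theorem pv_main (n : Nat) : ∀ (f1 f2 : Nat) (c k : Int), n < f1 → n < f2 →
    pvGoA f1 (n : Int) c - c = pvWhileB f2 (n : Int) k - k := by
  induction n using Nat.strong_induction_on with
  | _ n ih =>
    intro f1 f2 c k h1 h2
    match f1, f2 with
    | a+1, b+1 =>
      rw [pvGoA, pvWhileB]
      by_cases hn : n < 10
      · rw [if_pos (by rw [pv_len_one_iff]; exact hn),
            if_neg (by exact_mod_cast not_le.mpr (show (n:Int) < 10 by exact_mod_cast hn))]
        ring
      · push_neg at hn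
        rw [if_neg (by rw [pv_len_one_iff]; omega),
            if_pos (by exact_mod_cast hn)]
        have hs : pvDigitsumA (n : Int) = ((Nat.digits 10 n).sum : Int) :=
          pv_digitsumA_eq n (by omega)
        have hs' : pvDsumB (((n : Int)).toNat + 1) (n : Int) 0 = ((Nat.digits 10 n).sum : Int) := by
          rw [pv_dsumB_eq n ((( n : Int)).toNat + 1) 0 (by omega)]; ring
        set s := (Nat.digits 10 n).sum with hsdef
        have hslt : s < n := pv_sum_digits_lt n hn
        rw [hs, hs']
        have := ih s hslt a b (c + 1) (k + 1) (by omega) (by omega)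
        omega

-- ===== VERDICT (by name: the statement is the Claim_ definition above) =====
theorem digitDegree_spec : Claim_equal_digitDegree := by
  intro n c _ hpre
  show digitDegree n c = digitDegree_alt n c
  replace hpre : 0 ≤ n := hpre
  obtain ⟨m, rfl⟩ : ∃ m : Nat, n = (m : Int) := ⟨n.toNat, by omega⟩
  unfold digitDegree digitDegree_alt
  rw [Int.natAbs_natCast]
  have := pv_main m (m + 1) (m + 1) c 0 (by omega) (by omega)
  omega
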